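-- pv_equiv track=rewrite | github.com/Mallikharjuna71/python_practice | functions.py | arrange_blocks
-- ===== SOURCE A (Python) =====
-- def arrange_blocks(l):
--     if l == sorted(l):
--         return 'Yes'
--     l = l[::-1]
--     if len(l)%2!=0:
--         length = len(l)
--         if l[length//2]>l[(length//2)-1] or l[length//2]>l[(length//2)+1]:
--             return 'No'
--     for i in range((len(l)//2)-1):
--         j = (i*-1)-1
--         if l[i]<l[i+1] or l[j]<l[j-1]:
--             return 'No'
--     return 'yes'
-- ===== SOURCE B (Python) =====
-- def arrange_blocks(l):
--     n = len(l)
--     h = n // 2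
--     asc = True
--     ok = True
--     for i in range(n - 1):
--         if l[i] > l[i + 1]:
--             asc = False
--             if i >= n - h:
--                 ok = False
--         elif l[i] < l[i + 1] and i < h - 1:
--             ok = False
--     if asc:
--         return 'Yes'
--     if n % 2 == 1 and (l[h] > l[h - 1] or l[h] > l[h + 1]):
--         return 'No'
--     return 'yes' if ok else 'No'
-- ===== Notes on version B (the rewrite author's own statement) =====
-- stated objective: alternative
-- what changed: Replaced A's staged passes (sorted()-equality test, list reversal, then a symmetric negative-index loop) by one fused left-to-right scan over adjacent pairs that classifies each pair by its index and maintains two boolean accumulators (globally-ascending, valley-ok), deciding the answer from them afterwards.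
import Mathlib
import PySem

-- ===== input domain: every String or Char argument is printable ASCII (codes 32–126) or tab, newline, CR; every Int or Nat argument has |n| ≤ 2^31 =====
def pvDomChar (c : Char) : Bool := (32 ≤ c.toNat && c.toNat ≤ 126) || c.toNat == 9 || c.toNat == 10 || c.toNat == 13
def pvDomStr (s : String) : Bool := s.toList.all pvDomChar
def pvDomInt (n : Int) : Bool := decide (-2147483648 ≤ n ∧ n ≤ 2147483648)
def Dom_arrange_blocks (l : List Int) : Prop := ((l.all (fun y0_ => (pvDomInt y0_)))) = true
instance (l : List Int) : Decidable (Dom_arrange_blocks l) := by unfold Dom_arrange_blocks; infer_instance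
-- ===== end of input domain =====

-- B replaces A's staged passes (sorted()-equality, reversal, symmetric negative-index loop) by one
-- fused left-to-right scan with two boolean accumulators (objective: alternative decomposition).


-- ===== PORT A =====
-- A-side helper: the for-loop with its early 'return No'.  Every index A reads is in
-- range on every reachable iteration (see the proofs below), so pyGetD is exact here.
def arrangeLoopA (l : List Int) : List Int → String
  | [] => "yes"
  | i :: rest =>
    let j := i * (-1) - 1
    if PySem.List.pyGetD l i 0 < PySem.List.pyGetD l (i + 1) 0 ∨
       PySem.List.pyGetD l j 0 < PySem.List.pyGetD l (j - 1) 0 then "No"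
    else arrangeLoopA l rest

def arrange_blocks (l : List Int) : String :=
  if l = PySem.List.sorted l (fun x => x) false then "Yes"
  else
    let r := (PySem.List.slice? l none none (-1)).getD []   -- l = l[::-1]
    if PySem.Int.mod (r.length : Int) 2 ≠ 0 then
      let length : Int := (r.length : Int)
      if PySem.List.pyGetD r (PySem.Int.floordiv length 2) 0 > PySem.List.pyGetD r (PySem.Int.floordiv length 2 - 1) 0 ∨
         PySem.List.pyGetD r (PySem.Int.floordiv length 2) 0 > PySem.List.pyGetD r (PySem.Int.floordiv length 2 + 1) 0 then "No"
      else arrangeLoopA r (PySem.List.pyRange 0 (PySem.Int.floordiv (r.length : Int) 2 - 1) 1)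
    else arrangeLoopA r (PySem.List.pyRange 0 (PySem.Int.floordiv (r.length : Int) 2 - 1) 1)

-- ===== PORT B =====
-- B-side helper: the body of B's single for-loop, updating the state (asc, ok).
def altStep (l : List Int) (n h : Int) (st : Bool × Bool) (i : Int) : Bool × Bool :=
  if PySem.List.pyGetD l i 0 > PySem.List.pyGetD l (i + 1) 0 then
    (false, if i ≥ n - h then false else st.2)
  else if PySem.List.pyGetD l i 0 < PySem.List.pyGetD l (i + 1) 0 ∧ i < h - 1 then
    (st.1, false)
  else st

def arrange_blocks_alt (l : List Int) : String :=
  let n : Int := (l.length : Int)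
  let h := PySem.Int.floordiv n 2
  let st := (PySem.List.pyRange 0 (n - 1) 1).foldl (altStep l n h) (true, true)
  if st.1 then "Yes"
  else if PySem.Int.mod n 2 = 1 ∧
      (PySem.List.pyGetD l h 0 > PySem.List.pyGetD l (h - 1) 0 ∨
       PySem.List.pyGetD l h 0 > PySem.List.pyGetD l (h + 1) 0) then "No"
  else if st.2 then "yes" else "No"

-- ===== PRECONDITION & SPEC =====
def Spec_arrange_blocks (l : List Int) (out : String) : Prop := out = arrange_blocks_alt l
instance (l : List Int) (out : String) : Decidable (Spec_arrange_blocks l out) := by unfold Spec_arrange_blocks; infer_instance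

-- ===== CLAIM (what is proved, stated in full; the proofs are below) =====
def Claim_equal_arrange_blocks : Prop := ∀ (l : List Int), Dom_arrange_blocks l → Spec_arrange_blocks l (arrange_blocks l)

-- ===== LEMMAS AND PROOFS =====

-- the per-index predicates B's two accumulators conjoin
def pAsc (l : List Int) (i : Int) : Bool :=
  !decide (PySem.List.pyGetD l i 0 > PySem.List.pyGetD l (i + 1) 0)

def pOk (l : List Int) (n h i : Int) : Bool :=
  (!(decide (PySem.List.pyGetD l i 0 > PySem.List.pyGetD l (i + 1) 0) && decide (i ≥ n - h))) &&
  (!(decide (PySem.List.pyGetD l i 0 < PySem.List.pyGetD l (i + 1) 0) && decide (i < h - 1)))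

theorem altStep_eq (l : List Int) (n h : Int) (st : Bool × Bool) (i : Int) :
    altStep l n h st i = (st.1 && pAsc l i, st.2 && pOk l n h i) := by
  obtain ⟨a, b⟩ := st
  unfold altStep pAsc pOk
  by_cases hgt : PySem.List.pyGetD l i 0 > PySem.List.pyGetD l (i + 1) 0
  · rw [if_pos hgt]
    have hlt : ¬ (PySem.List.pyGetD l i 0 < PySem.List.pyGetD l (i + 1) 0) := by omega
    by_cases hge : i ≥ n - h
    · simp [hgt, hlt, hge]
    · simp [hgt, hlt, hge]
  · rw [if_neg hgt]
    by_cases h2 : PySem.List.pyGetD l i 0 < PySem.List.pyGetD l (i + 1) 0 ∧ i < h - 1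
    · rw [if_pos h2]
      simp [hgt, h2.1, h2.2]
    · rw [if_neg h2]
      rcases Decidable.not_and_iff_not_or_not.mp h2 with hlt | hi
      · simp [hgt, hlt]
      · by_cases hlt : PySem.List.pyGetD l i 0 < PySem.List.pyGetD l (i + 1) 0
        · simp [hgt, hlt, hi]
        · simp [hgt, hlt]

theorem foldl_altStep (l : List Int) (n h : Int) :
    ∀ (xs : List Int) (a b : Bool),
      xs.foldl (altStep l n h) (a, b) = (a && xs.all (pAsc l), b && xs.all (pOk l n h)) := by
  intro xs
  induction xs with
  | nil => intro a b; simp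
  | cons x t ih =>
    intro a b
    rw [List.foldl_cons, altStep_eq, ih]
    simp [Bool.and_assoc]

theorem allAsc_iff (l : List Int) :
    ((PySem.List.pyRange 0 ((l.length : Int) - 1) 1).all (pAsc l) = true) ↔
      ∀ k : Nat, k + 1 < l.length → l.getD k 0 ≤ l.getD (k + 1) 0 := by
  rw [List.all_eq_true]
  constructor
  · intro ha k hk
    have hm : ((k : Int)) ∈ PySem.List.pyRange 0 ((l.length : Int) - 1) 1 :=
      PySem.List.mem_pyRange_one.mpr ⟨Int.natCast_nonneg k, by omega⟩
    have h2 := ha _ hm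
    unfold pAsc at h2
    rw [PySem.List.pyGetD_natCast,
      show ((k : Int) + 1) = ((k + 1 : Nat) : Int) from by push_cast; ring,
      PySem.List.pyGetD_natCast] at h2
    simp only [Bool.not_eq_true', decide_eq_false_iff_not, not_lt] at h2
    exact h2
  · intro hA i hi
    have h0 := PySem.List.mem_pyRange_one.mp hi
    lift i to Nat using h0.1 with k
    have hk : k + 1 < l.length := by
      have := h0.2; push_cast at this; omega
    have h2 := hA k hk
    unfold pAsc
    rw [PySem.List.pyGetD_natCast,
      show ((k : Int) + 1) = ((k + 1 : Nat) : Int) from by push_cast; ring,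
      PySem.List.pyGetD_natCast]
    simp only [Bool.not_eq_true', decide_eq_false_iff_not, not_lt]
    exact h2

theorem allOk_iff (l : List Int) :
    ((PySem.List.pyRange 0 ((l.length : Int) - 1) 1).all
        (pOk l (l.length : Int) ((l.length / 2 : Nat) : Int)) = true) ↔
      ((∀ k : Nat, k + 1 < l.length / 2 → l.getD (k + 1) 0 ≤ l.getD k 0) ∧
       (∀ k : Nat, k + 1 < l.length / 2 →
          l.getD (l.length - l.length / 2 + k) 0 ≤ l.getD (l.length - l.length / 2 + k + 1) 0)) := by
  rw [List.all_eq_true]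
  have hh : l.length / 2 ≤ l.length := Nat.div_le_self _ _
  constructor
  · intro ha
    constructor
    · intro k hk
      have hm : ((k : Int)) ∈ PySem.List.pyRange 0 ((l.length : Int) - 1) 1 :=
        PySem.List.mem_pyRange_one.mpr ⟨Int.natCast_nonneg k, by omega⟩
      have h2 := ha _ hm
      unfold pOk at h2
      simp only [Bool.and_eq_true, Bool.not_eq_true', Bool.and_eq_false_iff,
        decide_eq_false_iff_not, not_lt] at h2
      rcases h2.2 with hc | hc
      · rw [PySem.List.pyGetD_natCast,
          show ((k : Int) + 1) = ((k + 1 : Nat) : Int) from by push_cast; ring,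
          PySem.List.pyGetD_natCast] at hc
        exact hc
      · exfalso; omega
    · intro k hk
      set j : Nat := l.length - l.length / 2 + k with hj
      have hm : ((j : Int)) ∈ PySem.List.pyRange 0 ((l.length : Int) - 1) 1 :=
        PySem.List.mem_pyRange_one.mpr ⟨Int.natCast_nonneg j, by omega⟩
      have h2 := ha _ hm
      unfold pOk at h2
      simp only [Bool.and_eq_true, Bool.not_eq_true', Bool.and_eq_false_iff,
        decide_eq_false_iff_not, not_lt] at h2
      rcases h2.1 with hc | hc
      · rw [PySem.List.pyGetD_natCast,
          show ((j : Int) + 1) = ((j + 1 : Nat) : Int) from by push_cast; ring,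
          PySem.List.pyGetD_natCast] at hc
        simpa [hj] using hc
      · exfalso; omega
  · rintro ⟨hdown, hup⟩ i hi
    have h0 := PySem.List.mem_pyRange_one.mp hi
    lift i to Nat using h0.1 with k
    have hk : k + 1 < l.length := by
      have := h0.2; push_cast at this; omega
    unfold pOk
    simp only [Bool.and_eq_true, Bool.not_eq_true', Bool.and_eq_false_iff,
      decide_eq_false_iff_not, not_lt]
    rw [PySem.List.pyGetD_natCast,
      show ((k : Int) + 1) = ((k + 1 : Nat) : Int) from by push_cast; ring,
      PySem.List.pyGetD_natCast]
    constructor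
    · by_cases hge : l.length - l.length / 2 ≤ k
      · left
        have h2 := hup (k - (l.length - l.length / 2)) (by omega)
        rw [show l.length - l.length / 2 + (k - (l.length - l.length / 2)) = k from by omega] at h2
        exact h2
      · right; push_cast; omega
    · by_cases hlt : k + 1 < l.length / 2
      · left; exact hdown k hlt
      · right; push_cast; omega

theorem sorted_id_eq_iff (l : List Int) :
    l = PySem.List.sorted l (fun x => x) false ↔ l.Pairwise (· ≤ ·) := by
  constructor
  · intro h
    have := PySem.List.sorted_pairwise (xs := l) (key := fun x => x)
    rw [← h] at this
    simpa using this
  · intro h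
    exact (PySem.List.sorted_eq_self_of_pairwise (xs := l) (key := fun x => x) (by simpa using h)).symm

theorem pairwise_iff_adj (l : List Int) :
    l.Pairwise (· ≤ ·) ↔ ∀ (k : Nat), k + 1 < l.length → l.getD k 0 ≤ l.getD (k+1) 0 := by
  rw [← List.isChain_iff_pairwise, List.isChain_iff_getElem]
  constructor
  · intro hc k hk
    rw [List.getD_eq_getElem l 0 (by omega), List.getD_eq_getElem l 0 hk]
    exact hc k hk
  · intro hc k hk
    have := hc k hk
    rwa [List.getD_eq_getElem l 0 (by omega), List.getD_eq_getElem l 0 hk] at this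

theorem loopA_eq (l : List Int) (idxs : List Int) :
    arrangeLoopA l idxs =
      if idxs.all (fun i =>
          !(decide (PySem.List.pyGetD l i 0 < PySem.List.pyGetD l (i + 1) 0) ||
            decide (PySem.List.pyGetD l (i * (-1) - 1) 0 < PySem.List.pyGetD l (i * (-1) - 1 - 1) 0)))
      then "yes" else "No" := by
  induction idxs with
  | nil => simp [arrangeLoopA]
  | cons i rest ih =>
    simp only [arrangeLoopA, List.all_cons]
    by_cases hc : PySem.List.pyGetD l i 0 < PySem.List.pyGetD l (i + 1) 0 ∨
        PySem.List.pyGetD l (i * (-1) - 1) 0 < PySem.List.pyGetD l (i * (-1) - 1 - 1) 0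
    · rw [if_pos hc]
      have hb : (!(decide (PySem.List.pyGetD l i 0 < PySem.List.pyGetD l (i + 1) 0) ||
          decide (PySem.List.pyGetD l (i * (-1) - 1) 0 < PySem.List.pyGetD l (i * (-1) - 1 - 1) 0))) = false := by
        simp only [Bool.not_eq_false', Bool.or_eq_true, decide_eq_true_eq]
        exact hc
      simp only [hb, Bool.false_and]
      simp
    · rw [if_neg hc, ih]
      have hb : (!(decide (PySem.List.pyGetD l i 0 < PySem.List.pyGetD l (i + 1) 0) ||
          decide (PySem.List.pyGetD l (i * (-1) - 1) 0 < PySem.List.pyGetD l (i * (-1) - 1 - 1) 0))) = true := by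
        simp only [Bool.not_eq_true', Bool.or_eq_false_iff, decide_eq_false_iff_not]
        exact not_or.mp hc
      simp only [hb, Bool.true_and]

theorem main_eq (l : List Int) : arrange_blocks l = arrange_blocks_alt l := by
  have hfd : PySem.Int.floordiv (l.length : Int) 2 = ((l.length / 2 : Nat) : Int) := by
    exact_mod_cast PySem.Int.floordiv_natCast l.length 2
  have hmod2 : PySem.Int.mod (l.length : Int) 2 = ((l.length % 2 : Nat) : Int) := by
    exact_mod_cast PySem.Int.mod_natCast l.length 2
  have hstB := foldl_altStep l (l.length : Int) ((l.length / 2 : Nat) : Int)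
      (PySem.List.pyRange 0 ((l.length : Int) - 1) 1) true true
  simp only [Bool.true_and] at hstB
  by_cases hs : l = PySem.List.sorted l (fun x => x) false
  · have hadj := (pairwise_iff_adj l).mp ((sorted_id_eq_iff l).mp hs)
    have hasc : (PySem.List.pyRange 0 ((l.length : Int) - 1) 1).all (pAsc l) = true :=
      (allAsc_iff l).mpr hadj
    simp only [arrange_blocks, arrange_blocks_alt, if_pos hs, hfd, hstB, hasc]
    simp
  · have hnadj : ¬ ∀ (k : Nat), k + 1 < l.length → l.getD k 0 ≤ l.getD (k+1) 0 := by
      intro hadj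
      exact hs ((sorted_id_eq_iff l).mpr ((pairwise_iff_adj l).mpr hadj))
    have hasc : (PySem.List.pyRange 0 ((l.length : Int) - 1) 1).all (pAsc l) = false :=
      Bool.eq_false_iff.mpr (fun ht => hnadj ((allAsc_iff l).mp ht))
    have hn2 : 2 ≤ l.length := by
      by_contra hc
      exact hnadj (fun k hk => by omega)
    have hh : l.length / 2 ≤ l.length := Nat.div_le_self _ _
    simp only [arrange_blocks, arrange_blocks_alt, if_neg hs, hfd, hmod2, hstB, hasc]
    rw [PySem.List.slice?_none_none_neg_one]
    simp only [Option.getD_some, List.length_reverse, Bool.false_eq_true, if_false]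
    rw [loopA_eq, hfd, hmod2]
    -- indexing the reversed list
    have hrk : ∀ k : Nat, k < l.length → PySem.List.pyGetD l.reverse (↑k) 0 = l.getD (l.length - 1 - k) 0 := by
      intro k hk
      rw [PySem.List.pyGetD_natCast]
      rw [List.getD_eq_getElem _ _ (by simpa using hk), List.getElem_reverse,
        List.getD_eq_getElem l 0 (by omega)]
    have hrneg : ∀ k : Nat, k < l.length → PySem.List.pyGetD l.reverse (-(↑(k+1) : Int)) 0 = l.getD k 0 := by
      intro k hk
      rw [PySem.List.pyGetD_neg_natCast l.reverse (k+1) 0 (by omega) (by simpa using hk)]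
      simp only [List.length_reverse]
      rw [List.getElem_reverse, List.getD_eq_getElem l 0 (by omega)]
      congr 1
      omega
    -- A's loop condition, index-translated to the original list
    have hAall : (((PySem.List.pyRange 0 ((↑(l.length / 2) : Int) - 1) 1).all (fun i =>
        !(decide (PySem.List.pyGetD l.reverse i 0 < PySem.List.pyGetD l.reverse (i + 1) 0) ||
          decide (PySem.List.pyGetD l.reverse (i * (-1) - 1) 0 <
            PySem.List.pyGetD l.reverse (i * (-1) - 1 - 1) 0)))) = true)
        ↔ ∀ k : Nat, k + 1 < l.length / 2 →
            (l.getD (l.length - 2 - k) 0 ≤ l.getD (l.length - 1 - k) 0 ∧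
              l.getD (k + 1) 0 ≤ l.getD k 0) := by
      rw [List.all_eq_true]
      constructor
      · intro ha k hk
        have hm : ((k : Int)) ∈ PySem.List.pyRange 0 ((↑(l.length / 2) : Int) - 1) 1 :=
          PySem.List.mem_pyRange_one.mpr ⟨Int.natCast_nonneg k, by push_cast; omega⟩
        have h2 := ha _ hm
        rw [hrk k (by omega),
          show ((k : Int) + 1) = ((k + 1 : Nat) : Int) from by push_cast; ring,
          hrk (k + 1) (by omega),
          show ((k : Int) * (-1) - 1) = -((k + 1 : Nat) : Int) from by push_cast; ring,
          hrneg k (by omega),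
          show (-((k + 1 : Nat) : Int) - 1) = -((k + 1 + 1 : Nat) : Int) from by push_cast; ring,
          hrneg (k + 1) (by omega),
          show l.length - 1 - (k + 1) = l.length - 2 - k from by omega] at h2
        simp only [Bool.not_eq_true', Bool.or_eq_false_iff, decide_eq_false_iff_not, not_lt] at h2
        exact ⟨h2.1, h2.2⟩
      · intro hA i hi
        have h0 := PySem.List.mem_pyRange_one.mp hi
        lift i to Nat using h0.1 with k
        have hk : k + 1 < l.length / 2 := by
          have := h0.2
          push_cast at this
          omega
        have h2 := hA k hk
        rw [hrk k (by omega),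
          show ((k : Int) + 1) = ((k + 1 : Nat) : Int) from by push_cast; ring,
          hrk (k + 1) (by omega),
          show ((k : Int) * (-1) - 1) = -((k + 1 : Nat) : Int) from by push_cast; ring,
          hrneg k (by omega),
          show (-((k + 1 : Nat) : Int) - 1) = -((k + 1 + 1 : Nat) : Int) from by push_cast; ring,
          hrneg (k + 1) (by omega),
          show l.length - 1 - (k + 1) = l.length - 2 - k from by omega]
        simp only [Bool.not_eq_true', Bool.or_eq_false_iff, decide_eq_false_iff_not, not_lt]
        exact ⟨h2.1, h2.2⟩
    -- the reindexing k ↦ h - 2 - k identifies A's loop condition with B's ok-accumulator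
    have hcore : (∀ k : Nat, k + 1 < l.length / 2 →
          (l.getD (l.length - 2 - k) 0 ≤ l.getD (l.length - 1 - k) 0 ∧
            l.getD (k + 1) 0 ≤ l.getD k 0))
        ↔ ((∀ k : Nat, k + 1 < l.length / 2 → l.getD (k + 1) 0 ≤ l.getD k 0) ∧
           (∀ k : Nat, k + 1 < l.length / 2 →
              l.getD (l.length - l.length / 2 + k) 0 ≤ l.getD (l.length - l.length / 2 + k + 1) 0)) := by
      constructor
      · intro p
        refine ⟨fun k hk => (p k hk).2, fun k hk => ?_⟩
        have h2 := (p (l.length / 2 - 2 - k) (by omega)).1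
        rw [show l.length - 2 - (l.length / 2 - 2 - k) = l.length - l.length / 2 + k from by omega,
            show l.length - 1 - (l.length / 2 - 2 - k) = l.length - l.length / 2 + k + 1 from by omega] at h2
        exact h2
      · rintro ⟨p1, p2⟩ k hk
        refine ⟨?_, p1 k hk⟩
        have h2 := p2 (l.length / 2 - 2 - k) (by omega)
        rw [show l.length - l.length / 2 + (l.length / 2 - 2 - k) = l.length - 2 - k from by omega,
            show l.length - 2 - k + 1 = l.length - 1 - k from by omega] at h2
        exact h2
    have hAD : (((PySem.List.pyRange 0 ((↑(l.length / 2) : Int) - 1) 1).all (fun i =>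
        !(decide (PySem.List.pyGetD l.reverse i 0 < PySem.List.pyGetD l.reverse (i + 1) 0) ||
          decide (PySem.List.pyGetD l.reverse (i * (-1) - 1) 0 <
            PySem.List.pyGetD l.reverse (i * (-1) - 1 - 1) 0)))))
        = (PySem.List.pyRange 0 ((l.length : Int) - 1) 1).all
            (pOk l (l.length : Int) ((l.length / 2 : Nat) : Int)) :=
      Bool.eq_iff_iff.mpr (hAall.trans (hcore.trans (allOk_iff l).symm))
    by_cases hodd : l.length % 2 = 0
    · rw [if_neg (show ¬((↑(l.length % 2) : Int) ≠ 0) from by simp [hodd]), hAD,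
        if_neg (show ¬((↑(l.length % 2) : Int) = 1 ∧
          (PySem.List.pyGetD l (↑(l.length / 2)) 0 > PySem.List.pyGetD l (↑(l.length / 2) - 1) 0 ∨
           PySem.List.pyGetD l (↑(l.length / 2)) 0 > PySem.List.pyGetD l (↑(l.length / 2) + 1) 0)) from by
          rintro ⟨h1, -⟩; omega)]
    · have hodd1 : l.length % 2 = 1 := by omega
      rw [if_pos (show (↑(l.length % 2) : Int) ≠ 0 from by simp [hodd1])]
      have e1 : PySem.List.pyGetD l.reverse (↑(l.length / 2) : Int) 0 = l.getD (l.length / 2) 0 := by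
        rw [hrk (l.length / 2) (by omega),
          show l.length - 1 - l.length / 2 = l.length / 2 from by omega]
      have e2 : PySem.List.pyGetD l.reverse ((↑(l.length / 2) : Int) - 1) 0 = l.getD (l.length / 2 + 1) 0 := by
        rw [show ((↑(l.length / 2) : Int) - 1) = ((l.length / 2 - 1 : Nat) : Int) from by omega,
          hrk (l.length / 2 - 1) (by omega),
          show l.length - 1 - (l.length / 2 - 1) = l.length / 2 + 1 from by omega]
      have e3 : PySem.List.pyGetD l.reverse ((↑(l.length / 2) : Int) + 1) 0 = l.getD (l.length / 2 - 1) 0 := by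
        rw [show ((↑(l.length / 2) : Int) + 1) = ((l.length / 2 + 1 : Nat) : Int) from by omega,
          hrk (l.length / 2 + 1) (by omega),
          show l.length - 1 - (l.length / 2 + 1) = l.length / 2 - 1 from by omega]
      have f1 : PySem.List.pyGetD l (↑(l.length / 2) : Int) 0 = l.getD (l.length / 2) 0 := by
        rw [PySem.List.pyGetD_natCast]
      have f2 : PySem.List.pyGetD l ((↑(l.length / 2) : Int) - 1) 0 = l.getD (l.length / 2 - 1) 0 := by
        rw [show ((↑(l.length / 2) : Int) - 1) = ((l.length / 2 - 1 : Nat) : Int) from by omega,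
          PySem.List.pyGetD_natCast]
      have f3 : PySem.List.pyGetD l ((↑(l.length / 2) : Int) + 1) 0 = l.getD (l.length / 2 + 1) 0 := by
        rw [show ((↑(l.length / 2) : Int) + 1) = ((l.length / 2 + 1 : Nat) : Int) from by omega,
          PySem.List.pyGetD_natCast]
      rw [e1, e2, e3, f1, f2, f3]
      by_cases hM : l.getD (l.length / 2) 0 > l.getD (l.length / 2 + 1) 0 ∨
          l.getD (l.length / 2) 0 > l.getD (l.length / 2 - 1) 0
      · rw [if_pos hM, if_pos ⟨by omega, hM.symm⟩]
      · rw [if_neg hM, if_neg (show ¬((↑(l.length % 2) : Int) = 1 ∧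
            (l.getD (l.length / 2) 0 > l.getD (l.length / 2 - 1) 0 ∨
             l.getD (l.length / 2) 0 > l.getD (l.length / 2 + 1) 0)) from by
            rintro ⟨-, h2⟩; exact hM h2.symm), hAD]

-- ===== VERDICT (by name: the statement is the Claim_ definition above) =====
theorem arrange_blocks_spec : Claim_equal_arrange_blocks := by
  intro l _
  exact main_eq l
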